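-- pv_equiv track=rewrite | github.com/mathbeveridge/asm | starbar.py | triangle_to_starbar
-- ===== SOURCE A (Python) =====
-- def triangle_to_starbar(triangle, size):
--
--     starbar = []
--
--     for idx,row in enumerate(triangle):
--         row = list_to_starbar(row, idx+1)
--         for k in range(size-1-idx):
--             row.insert(0,2)
--             row.append(2)
--
--         starbar.append(row)
--
--
--
--     return starbar
--
-- def list_to_starbar(list, size):
--     starbar = []
--
--
--     for i in range(size+1):
--         for j in range(list.count(i)):
--             starbar.append(0);
--
--         if (i < size):
--             starbar.append(1)
--
--     return starbar
-- ===== SOURCE B (Python) =====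
-- def triangle_to_starbar(triangle, size):
--     out = []
--     for idx, row in enumerate(triangle):
--         s = idx + 1
--         vals = sorted(x for x in row if 0 <= x <= s)
--         sb = []
--         v = 0
--         for e in vals:
--             while v < e:
--                 sb.append(1)
--                 v += 1
--             sb.append(0)
--         while v < s:
--             sb.append(1)
--             v += 1
--         pad = [2] * (size - 1 - idx)
--         out.append(pad + sb + pad)
--     return out
-- ===== Notes on version B (the rewrite author's own statement) =====
-- stated objective: faster
-- what changed: B sorts each row's in-range values once and emits the 0/1 sequence in a single merge-like pass with a running expected value, instead of A's repeated list.count scan for every value 0..row-size and its insert(0,2)/append padding loop.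
import Mathlib
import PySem

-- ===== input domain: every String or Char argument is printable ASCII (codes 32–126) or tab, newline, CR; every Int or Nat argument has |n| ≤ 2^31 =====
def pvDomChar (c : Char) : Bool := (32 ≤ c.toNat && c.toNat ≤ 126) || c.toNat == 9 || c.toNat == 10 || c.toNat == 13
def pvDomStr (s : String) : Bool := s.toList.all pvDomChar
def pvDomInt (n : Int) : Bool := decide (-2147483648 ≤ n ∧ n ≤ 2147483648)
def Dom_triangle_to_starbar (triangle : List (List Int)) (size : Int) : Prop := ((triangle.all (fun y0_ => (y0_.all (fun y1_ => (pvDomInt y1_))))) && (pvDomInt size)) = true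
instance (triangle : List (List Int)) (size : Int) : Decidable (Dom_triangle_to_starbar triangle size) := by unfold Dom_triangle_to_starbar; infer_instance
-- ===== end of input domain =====

-- B replaces A's per-value list.count scans with a sort of the row's in-range values and one
-- merge-like pass (running expected value v, emitting separator 1s and element 0s), a different
-- algorithm (objective: alternative/faster per row size).

-- ===== PORT A =====
-- helper: Python's list_to_starbar(list, size)
def list_to_starbar (list : List Int) (size : Int) : List Int :=
  (PySem.List.pyRange 0 (size + 1) 1).foldl (fun sb i =>
    let sb := (PySem.List.pyRange 0 ((PySem.List.count list i : Nat) : Int) 1).foldl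
      (fun acc _ => acc ++ [0]) sb
    if i < size then sb ++ [1] else sb) []

def triangle_to_starbar (triangle : List (List Int)) (size : Int) : List (List Int) :=
  (PySem.List.enumerate triangle 0).foldl (fun starbar p =>
    let row := list_to_starbar p.2 (p.1 + 1)
    let row := (PySem.List.pyRange 0 (size - 1 - p.1) 1).foldl
      (fun r _ => PySem.List.insert r 0 2 ++ [2]) row
    starbar ++ [row]) []

-- ===== PORT B =====
-- the 'while v < e: sb.append(1); v += 1' loop of Source B, step for step
def emitOnes (sb : List Int) (v e : Int) : List Int × Int :=
  if v < e then emitOnes (sb ++ [1]) (v + 1) e else (sb, v)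
termination_by (e - v).toNat
decreasing_by omega

def triangle_to_starbar_alt (triangle : List (List Int)) (size : Int) : List (List Int) :=
  (PySem.List.enumerate triangle 0).foldl (fun out p =>
    let s : Int := p.1 + 1
    let vals := PySem.List.sorted (p.2.filter (fun x => decide (0 ≤ x ∧ x ≤ s))) (fun x => x) false
    let q := vals.foldl (fun (q : List Int × Int) e =>
      let q := emitOnes q.1 q.2 e
      (q.1 ++ [0], q.2)) (([] : List Int), (0 : Int))
    let q := emitOnes q.1 q.2 s
    let pad := PySem.List.pyRepeat [2] (size - 1 - p.1)
    out ++ [pad ++ q.1 ++ pad]) []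

-- ===== PRECONDITION & SPEC =====
def Spec_triangle_to_starbar (triangle : List (List Int)) (size : Int) (out : List (List Int)) : Prop := out = triangle_to_starbar_alt triangle size
instance (triangle : List (List Int)) (size : Int) (out : List (List Int)) : Decidable (Spec_triangle_to_starbar triangle size out) := by unfold Spec_triangle_to_starbar; infer_instance

-- ===== CLAIM (what is proved, stated in full; the proofs are below) =====
def Claim_equal_triangle_to_starbar : Prop := ∀ (triangle : List (List Int)) (size : Int), Dom_triangle_to_starbar triangle size → Spec_triangle_to_starbar triangle size (triangle_to_starbar triangle size)

-- ===== LEMMAS AND PROOFS =====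

-- canonical per-row value both inner algorithms compute: for each i in a..s-1 the
-- zeros for count(i) then a separating 1, and finally the zeros for count(s)
def flatC (l : List Int) (a s : Int) : List Int :=
  if _ : a < s then List.replicate (l.count a) 0 ++ [1] ++ flatC l (a + 1) s
  else List.replicate (l.count s) 0
termination_by (s - a).toNat
decreasing_by omega

theorem flatC_lt (l : List Int) (a s : Int) (h : a < s) :
    flatC l a s = List.replicate (l.count a) 0 ++ [1] ++ flatC l (a + 1) s := by
  conv_lhs => rw [flatC]
  rw [dif_pos h]

theorem flatC_ge (l : List Int) (a s : Int) (h : ¬ a < s) :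
    flatC l a s = List.replicate (l.count s) 0 := by
  conv_lhs => rw [flatC]
  rw [dif_neg h]

theorem flatC_congr (l l' : List Int) (a s : Int)
    (h : ∀ i, a ≤ i → i ≤ s → l.count i = l'.count i) (has : a ≤ s) :
    flatC l a s = flatC l' a s := by
  by_cases hlt : a < s
  · rw [flatC_lt l a s hlt, flatC_lt l' a s hlt, h a (le_refl a) has,
      flatC_congr l l' (a+1) s (fun i h1 h2 => h i (by omega) h2) (by omega)]
  · rw [flatC_ge l a s hlt, flatC_ge l' a s hlt, h s has (le_refl s)]
termination_by (s - a).toNat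
decreasing_by omega

theorem flatC_nil (a s : Int) : flatC [] a s = List.replicate (s - a).toNat 1 := by
  by_cases hlt : a < s
  · rw [flatC_lt [] a s hlt, flatC_nil (a+1) s]
    rw [show (s - a).toNat = (s - (a+1)).toNat + 1 by omega, List.replicate_succ]
    simp
  · rw [flatC_ge [] a s hlt]
    rw [show (s - a).toNat = 0 by omega]
    simp
termination_by (s - a).toNat
decreasing_by omega

-- list.insert(0, v) prepends
theorem insert_zero (r : List Int) (v : Int) : PySem.List.insert r 0 v = v :: r := by
  simp [PySem.List.insert, PySem.List.sliceIndices]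

theorem rep_comm {α : Type} (n : Nat) (a : α) (l : List α) :
    List.replicate n a ++ a :: l = a :: (List.replicate n a ++ l) := by
  induction n with
  | zero => simp
  | succ k ih => simp [List.replicate_succ, ih]

-- A's padding loop wraps the row in replicate-2 blocks on both sides
theorem foldl_pad {α : Type} (l : List α) (r : List Int) :
    l.foldl (fun r _ => PySem.List.insert r 0 2 ++ [2]) r
      = List.replicate l.length 2 ++ r ++ List.replicate l.length 2 := by
  induction l generalizing r with
  | nil => simp
  | cons x t ih =>
      rw [List.foldl_cons, ih, insert_zero]
      simp [List.replicate_succ, rep_comm, List.append_assoc]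

-- a constant ++ [0] loop appends (length) zeros
theorem foldl_append_zero {α : Type} (l : List α) (sb : List Int) :
    l.foldl (fun acc _ => acc ++ [0]) sb = sb ++ List.replicate l.length 0 := by
  induction l generalizing sb with
  | nil => simp
  | cons x t ih => simp [List.foldl, ih, List.replicate_succ]

-- A's inner loop from index a onward produces the canonical form
theorem A_inner (row : List Int) (s : Int) (a : Int) (sb : List Int)
    (h0 : 0 ≤ a) (has : a ≤ s) :
    (PySem.List.pyRange a (s + 1) 1).foldl (fun sb i =>
        let sb := (PySem.List.pyRange 0 ((PySem.List.count row i : Nat) : Int) 1).foldl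
          (fun acc _ => acc ++ [0]) sb
        if i < s then sb ++ [1] else sb) sb
      = sb ++ flatC (row.filter (fun x => decide (0 ≤ x ∧ x ≤ s))) a s := by
  have hcnt : ∀ i, 0 ≤ i → i ≤ s →
      (row.filter (fun x => decide (0 ≤ x ∧ x ≤ s))).count i = row.count i := by
    intro i h1 h2
    rw [List.count_filter]
    simp [h1, h2]
  by_cases hlt : a < s
  · rw [PySem.List.pyRange_one_cons (by omega : a < s + 1), List.foldl_cons]
    dsimp only
    rw [if_pos hlt, foldl_append_zero, A_inner row s (a+1) _ (by omega) (by omega),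
      flatC_lt (row.filter (fun x => decide (0 ≤ x ∧ x ≤ s))) a s hlt]
    rw [hcnt a h0 (by omega)]
    simp [PySem.List.length_pyRange_one, PySem.List.count, List.append_assoc]
  · have ha : a = s := by omega
    rw [ha, PySem.List.pyRange_one_singleton, List.foldl_cons, List.foldl_nil]
    dsimp only
    rw [if_neg (lt_irrefl s), foldl_append_zero,
      flatC_ge (row.filter (fun x => decide (0 ≤ x ∧ x ≤ s))) s s (lt_irrefl s)]
    rw [hcnt s (by omega) (le_refl s)]
    simp [PySem.List.length_pyRange_one, PySem.List.count]
termination_by (s - a).toNat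
decreasing_by omega

theorem list_to_starbar_eq (row : List Int) (s : Int) (hs : 0 ≤ s) :
    list_to_starbar row s = flatC (row.filter (fun x => decide (0 ≤ x ∧ x ≤ s))) 0 s := by
  unfold list_to_starbar
  exact A_inner row s 0 [] (le_refl 0) hs

-- the while loop appends (e - v) ones and leaves v = e
theorem emitOnes_eq (sb : List Int) (v e : Int) (h : v ≤ e) :
    emitOnes sb v e = (sb ++ List.replicate (e - v).toNat 1, e) := by
  by_cases hlt : v < e
  · rw [emitOnes, if_pos hlt, emitOnes_eq (sb ++ [1]) (v+1) e (by omega)]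
    rw [List.append_assoc]
    rw [show (e - v).toNat = (e - (v+1)).toNat + 1 by omega, List.replicate_succ]
    simp
  · rw [emitOnes, if_neg hlt]
    have he : v = e := by omega
    rw [he]
    simp
termination_by (e - v).toNat
decreasing_by omega

-- merging one sorted head into the canonical form
theorem flatC_cons (t : List Int) (e v s : Int)
    (hve : v ≤ e) (hes : e ≤ s) (ht : ∀ x ∈ t, e ≤ x) :
    flatC (e :: t) v s = List.replicate (e - v).toNat 1 ++ [0] ++ flatC t e s := by
  by_cases hlt : v < e
  · rw [flatC_lt (e :: t) v s (by omega)]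
    have hnot : v ∉ e :: t := by
      intro hmem
      rcases List.mem_cons.mp hmem with h | h
      · omega
      · exact absurd (ht v h) (by omega)
    rw [List.count_eq_zero.mpr hnot]
    rw [flatC_cons t e (v+1) s (by omega) hes ht]
    rw [show (e - v).toNat = (e - (v+1)).toNat + 1 by omega, List.replicate_succ]
    simp
  · have hv : v = e := by omega
    subst hv
    rw [show (v - v).toNat = 0 by omega, List.replicate_zero, List.nil_append]
    by_cases hvs : v < s
    · rw [flatC_lt (v :: t) v s hvs, flatC_lt t v s hvs]
      rw [List.count_cons_self, List.replicate_succ]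
      rw [flatC_congr (v :: t) t (v+1) s
        (fun i h1 h2 => by rw [List.count_cons_of_ne (by omega)]) (by omega)]
      simp
    · rw [flatC_ge (v :: t) v s hvs, flatC_ge t v s hvs]
      have hv2 : v = s := by omega
      rw [← hv2, List.count_cons_self, List.replicate_succ]
      simp
termination_by (e - v).toNat
decreasing_by omega

-- B's merge pass over a sorted in-range list produces the canonical form
theorem B_merge (l : List Int) (v s : Int) (sb : List Int)
    (hsorted : l.Pairwise (· ≤ ·)) (hmem : ∀ x ∈ l, v ≤ x ∧ x ≤ s) (hvs : v ≤ s) :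
    (emitOnes (l.foldl (fun (q : List Int × Int) e =>
        ((emitOnes q.1 q.2 e).1 ++ [0], (emitOnes q.1 q.2 e).2)) (sb, v)).1
      (l.foldl (fun (q : List Int × Int) e =>
        ((emitOnes q.1 q.2 e).1 ++ [0], (emitOnes q.1 q.2 e).2)) (sb, v)).2 s).1
      = sb ++ flatC l v s := by
  match l with
  | [] =>
      simp only [List.foldl_nil]
      rw [emitOnes_eq sb v s hvs, flatC_nil]
  | e :: t =>
      have hve : v ≤ e := (hmem e (List.mem_cons_self)).1
      have hes : e ≤ s := (hmem e (List.mem_cons_self)).2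
      have ht : ∀ x ∈ t, e ≤ x := fun x hx => (List.pairwise_cons.mp hsorted).1 x hx
      rw [List.foldl_cons]
      dsimp only
      rw [emitOnes_eq sb v e hve]
      rw [B_merge t e s (sb ++ List.replicate (e - v).toNat 1 ++ [0])
        (List.pairwise_cons.mp hsorted).2
        (fun x hx => ⟨ht x hx, (hmem x (List.mem_cons_of_mem e hx)).2⟩) hes]
      rw [flatC_cons t e v s hve hes ht]
      simp [List.append_assoc]

-- ===== VERDICT (by name: the statement is the Claim_ definition above) =====
theorem triangle_to_starbar_spec : Claim_equal_triangle_to_starbar := by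
  intro triangle size _
  unfold Spec_triangle_to_starbar triangle_to_starbar triangle_to_starbar_alt
  apply PySem.List.foldl_congr_mem
  intro acc p hp
  rw [PySem.List.mem_enumerate_iff] at hp
  obtain ⟨k, hk, rfl⟩ := hp
  dsimp only
  have hs0 : (0 : Int) ≤ 0 + (k : Int) + 1 := by omega
  have hperm := PySem.List.sorted_perm
    (triangle[k].filter (fun x => decide (0 ≤ x ∧ x ≤ 0 + (k : Int) + 1))) (fun x => x) false
  have hpw : (PySem.List.sorted (triangle[k].filter (fun x => decide (0 ≤ x ∧ x ≤ 0 + (k : Int) + 1))) (fun x => x) false).Pairwise (· ≤ ·) := by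
    simpa using PySem.List.sorted_pairwise (triangle[k].filter (fun x => decide (0 ≤ x ∧ x ≤ 0 + (k : Int) + 1))) (fun x => x)
  have hmem : ∀ x ∈ PySem.List.sorted (triangle[k].filter (fun x => decide (0 ≤ x ∧ x ≤ 0 + (k : Int) + 1))) (fun x => x) false, (0 : Int) ≤ x ∧ x ≤ 0 + (k : Int) + 1 := by
    intro x hx
    have hx2 := List.of_mem_filter (hperm.mem_iff.mp hx)
    simpa using hx2
  have hB := B_merge
    (PySem.List.sorted (triangle[k].filter (fun x => decide (0 ≤ x ∧ x ≤ 0 + (k : Int) + 1))) (fun x => x) false)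
    0 (0 + (k : Int) + 1) [] hpw hmem hs0
  rw [foldl_pad, list_to_starbar_eq _ _ hs0, hB, List.nil_append]
  rw [flatC_congr
    (PySem.List.sorted (triangle[k].filter (fun x => decide (0 ≤ x ∧ x ≤ 0 + (k : Int) + 1))) (fun x => x) false)
    (triangle[k].filter (fun x => decide (0 ≤ x ∧ x ≤ 0 + (k : Int) + 1)))
    0 (0 + (k : Int) + 1) (fun i _ _ => hperm.count_eq i) hs0]
  simp only [PySem.List.length_pyRange_one, PySem.List.pyRepeat_singleton,
    Int.sub_zero, List.append_assoc]
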